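-- pv_equiv track=rewrite | github.com/Leedefend/sce-backend-odoo | scripts/product/build_capability_productization_v1.py | _role_scope
-- ===== SOURCE A (Python) =====
-- def _role_scope(roles: list[str]) -> list[str]:
--     if not roles:
--         return ["通用"]
--     out = set()
--     for role in roles:
--         if role == "owner":
--             out.add("业主")
--         elif role in {"pm", "finance", "executive"}:
--             out.add("施工")
--         else:
--             out.add("通用")
--     if "施工" in out and "业主" in out:
--         out.add("通用")
--     return sorted(out)
-- ===== SOURCE B (Python) =====
-- def _role_scope(roles: list[str]) -> list[str]:
--     if not roles:
--         return ["通用"]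
--     owner = "owner" in roles
--     constr = any(r in ("pm", "finance", "executive") for r in roles)
--     other = any(r not in ("owner", "pm", "finance", "executive") for r in roles)
--     # Build the result directly in sorted order: "业主" < "施工" < "通用" by code point.
--     return (
--         (["业主"] if owner else [])
--         + (["施工"] if constr else [])
--         + (["通用"] if other or (owner and constr) else [])
--     )
-- ===== Notes on version B (the rewrite author's own statement) =====
-- stated objective: simpler
-- what changed: Replaces the classify-into-a-set loop plus sorted() with three membership predicates over the roles list and a direct construction of the result in its already-sorted fixed order (no set, no sort).
import Mathlib
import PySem

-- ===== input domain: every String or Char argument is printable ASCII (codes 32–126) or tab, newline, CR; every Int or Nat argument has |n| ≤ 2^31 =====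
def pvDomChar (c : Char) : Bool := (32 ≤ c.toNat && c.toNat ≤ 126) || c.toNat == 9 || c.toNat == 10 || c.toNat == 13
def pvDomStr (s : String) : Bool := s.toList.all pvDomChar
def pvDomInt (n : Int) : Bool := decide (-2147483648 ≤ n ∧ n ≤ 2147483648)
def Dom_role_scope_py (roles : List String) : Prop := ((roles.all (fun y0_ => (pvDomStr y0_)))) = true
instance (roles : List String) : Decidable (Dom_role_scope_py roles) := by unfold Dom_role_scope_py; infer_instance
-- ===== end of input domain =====

-- B replaces A's classify-into-a-set loop plus sorted() by three membership
-- predicates over the list and a direct construction of the result in its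
-- fixed sorted order (objective: simpler).

-- ===== PORT A =====
def role_scope_py (roles : List String) : List String :=
  if roles = [] then ["通用"]
  else
    let out : PySem.Set String :=
      roles.foldl (fun out role =>
        if role = "owner" then PySem.Set.add out "业主"
        else if role = "pm" ∨ role = "finance" ∨ role = "executive" then
          PySem.Set.add out "施工"
        else PySem.Set.add out "通用") PySem.Set.empty
    let out := if "施工" ∈ out ∧ "业主" ∈ out then PySem.Set.add out "通用" else out
    PySem.List.sorted out (fun x => x) false

-- ===== PORT B =====
def role_scope_py_alt (roles : List String) : List String :=
  if roles = [] then ["通用"]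
  else
    let owner := roles.contains "owner"
    let constr := roles.any (fun r => r == "pm" || r == "finance" || r == "executive")
    let other := roles.any (fun r =>
      !(r == "owner" || r == "pm" || r == "finance" || r == "executive"))
    (if owner then ["业主"] else []) ++
    (if constr then ["施工"] else []) ++
    (if other || (owner && constr) then ["通用"] else [])

-- ===== PRECONDITION & SPEC =====
def Spec_role_scope_py (roles : List String) (out : List String) : Prop := out = role_scope_py_alt roles
instance (roles : List String) (out : List String) : Decidable (Spec_role_scope_py roles out) := by unfold Spec_role_scope_py; infer_instance

-- ===== CLAIM (what is proved, stated in full; the proofs are below) =====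
def Claim_equal_role_scope_py : Prop := ∀ (roles : List String), Dom_role_scope_py roles → Spec_role_scope_py roles (role_scope_py roles)

-- ===== LEMMAS AND PROOFS =====

-- the classify function A's loop applies before inserting into the set
def pvClassify (r : String) : String :=
  if r = "owner" then "业主"
  else if r = "pm" ∨ r = "finance" ∨ r = "executive" then "施工"
  else "通用"

lemma pv_foldl_eq_ofList (roles : List String) :
    roles.foldl (fun out role =>
        if role = "owner" then PySem.Set.add out "业主"
        else if role = "pm" ∨ role = "finance" ∨ role = "executive" then
          PySem.Set.add out "施工"
        else PySem.Set.add out "通用") PySem.Set.empty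
      = PySem.Set.ofList (roles.map pvClassify) := by
  rw [PySem.Set.ofList_eq_foldl, List.foldl_map]
  apply PySem.List.foldl_congr_mem
  intro acc r _
  simp only [pvClassify]
  split_ifs <;> rfl

lemma pv_mem_map_classify (y : String) (roles : List String) :
    y ∈ roles.map pvClassify ↔
      (y = "业主" ∧ "owner" ∈ roles)
      ∨ (y = "施工" ∧ ∃ r ∈ roles, r = "pm" ∨ r = "finance" ∨ r = "executive")
      ∨ (y = "通用" ∧ ∃ r ∈ roles, r ≠ "owner" ∧ r ≠ "pm" ∧ r ≠ "finance" ∧ r ≠ "executive") := by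
  simp only [List.mem_map]
  constructor
  · rintro ⟨r, hr, hcl⟩
    simp only [pvClassify] at hcl
    split_ifs at hcl with h1 h2
    · exact Or.inl ⟨hcl.symm, h1 ▸ hr⟩
    · exact Or.inr (Or.inl ⟨hcl.symm, r, hr, h2⟩)
    · push Not at h2
      exact Or.inr (Or.inr ⟨hcl.symm, r, hr, h1, h2⟩)
  · rintro (⟨hy, hr⟩ | ⟨hy, r, hr, hc⟩ | ⟨hy, r, hr, h1, h2, h3, h4⟩)
    · exact ⟨"owner", hr, by simp [pvClassify, hy]⟩
    · refine ⟨r, hr, ?_⟩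
      have : r ≠ "owner" := by rcases hc with h|h|h <;> simp [h]
      simp [pvClassify, this, hc, hy]
    · exact ⟨r, hr, by simp [pvClassify, h1, h2, h3, h4, hy]⟩

-- membership in B's directly-built list, for arbitrary Bool switches
lemma pv_L_mem {α : Type} (a b c : α) (p q r : Bool) (y : α) :
    y ∈ ((if p then [a] else []) ++ (if q then [b] else []) ++
          (if r then [c] else []) : List α)
      ↔ (y = a ∧ p = true) ∨ (y = b ∧ q = true) ∨ (y = c ∧ r = true) := by
  cases p <;> cases q <;> cases r <;> simp

-- B's directly-built list is strictly increasing, for arbitrary Bool switches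
lemma pv_L_pairwise {α : Type} [Preorder α] (a b c : α)
    (hab : a < b) (hbc : b < c) (hac : a < c) (p q r : Bool) :
    ((if p then [a] else []) ++ (if q then [b] else []) ++
      (if r then [c] else []) : List α).Pairwise (· < ·) := by
  cases p <;> cases q <;> cases r <;> simp [hab, hbc, hac]

theorem role_scope_py_spec : Claim_equal_role_scope_py := by
  intro roles _
  show role_scope_py roles = role_scope_py_alt roles
  unfold role_scope_py role_scope_py_alt
  by_cases hnil : roles = []
  · simp [hnil]
  · simp only [hnil, if_false]
    rw [pv_foldl_eq_ofList]
    -- string-literal facts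
    have neYS : ("业主" : String) ≠ "施工" := by decide
    have neYT : ("业主" : String) ≠ "通用" := by decide
    have neST : ("施工" : String) ≠ "通用" := by decide
    have hltYS : ("业主" : String) < "施工" := by
      rw [String.lt_iff_toList_lt]; decide
    have hltST : ("施工" : String) < "通用" := by
      rw [String.lt_iff_toList_lt]; decide
    have hltYT : ("业主" : String) < "通用" := by
      rw [String.lt_iff_toList_lt]; decide
    -- the three predicates, as Props
    have hmem0 : ∀ y, y ∈ PySem.Set.ofList (roles.map pvClassify) ↔
        (y = "业主" ∧ "owner" ∈ roles)
        ∨ (y = "施工" ∧ ∃ r ∈ roles, r = "pm" ∨ r = "finance" ∨ r = "executive")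
        ∨ (y = "通用" ∧ ∃ r ∈ roles, r ≠ "owner" ∧ r ≠ "pm" ∧ r ≠ "finance" ∧ r ≠ "executive") := by
      intro y
      rw [PySem.Set.mem_ofList, pv_mem_map_classify]
    set S0 := PySem.Set.ofList (roles.map pvClassify) with hS0
    set S1 := if "施工" ∈ S0 ∧ "业主" ∈ S0 then PySem.Set.add S0 "通用" else S0 with hS1
    have hmem1 : ∀ y, y ∈ S1 ↔
        (y = "业主" ∧ "owner" ∈ roles)
        ∨ (y = "施工" ∧ ∃ r ∈ roles, r = "pm" ∨ r = "finance" ∨ r = "executive")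
        ∨ (y = "通用" ∧ ((∃ r ∈ roles, r ≠ "owner" ∧ r ≠ "pm" ∧ r ≠ "finance" ∧ r ≠ "executive")
              ∨ ("owner" ∈ roles ∧ ∃ r ∈ roles, r = "pm" ∨ r = "finance" ∨ r = "executive"))) := by
      intro y
      have hownerOf : "业主" ∈ S0 → "owner" ∈ roles := by
        intro hm
        rcases (hmem0 _).mp hm with ⟨_, hw⟩ | ⟨he, _⟩ | ⟨he, _⟩
        · exact hw
        · exact absurd he neYS
        · exact absurd he neYT
      have hconstrOf : "施工" ∈ S0 →
          ∃ r ∈ roles, r = "pm" ∨ r = "finance" ∨ r = "executive" := by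
        intro hm
        rcases (hmem0 _).mp hm with ⟨he, _⟩ | ⟨_, hw⟩ | ⟨he, _⟩
        · exact absurd he.symm neYS
        · exact hw
        · exact absurd he neST
      rw [hS1]
      split_ifs with h
      · rw [PySem.Set.mem_add, hmem0]
        constructor
        · rintro ((h1 | h1 | h1) | h1)
          · exact Or.inl h1
          · exact Or.inr (Or.inl h1)
          · exact Or.inr (Or.inr ⟨h1.1, Or.inl h1.2⟩)
          · exact Or.inr (Or.inr ⟨h1, Or.inr ⟨hownerOf h.2, hconstrOf h.1⟩⟩)
        · rintro (h1 | h1 | ⟨h1, h2 | h2⟩)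
          · exact Or.inl (Or.inl h1)
          · exact Or.inl (Or.inr (Or.inl h1))
          · exact Or.inl (Or.inr (Or.inr ⟨h1, h2⟩))
          · exact Or.inr h1
      · rw [hmem0]
        constructor
        · rintro (h1 | h1 | h1)
          · exact Or.inl h1
          · exact Or.inr (Or.inl h1)
          · exact Or.inr (Or.inr ⟨h1.1, Or.inl h1.2⟩)
        · rintro (h1 | h1 | ⟨h1, h2 | h2⟩)
          · exact Or.inl h1
          · exact Or.inr (Or.inl h1)
          · exact Or.inr (Or.inr ⟨h1, h2⟩)
          · exact absurd ⟨(hmem0 _).mpr (Or.inr (Or.inl ⟨rfl, h2.2⟩)),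
              (hmem0 _).mpr (Or.inl ⟨rfl, h2.1⟩)⟩ h
    have hnodup1 : S1.Nodup := by
      rw [hS1, hS0]
      split_ifs with h
      · exact PySem.Set.nodup_add _ _ (PySem.Set.nodup_ofList _)
      · exact PySem.Set.nodup_ofList _
    -- B's list
    have hpair : ((if roles.contains "owner" then ["业主"] else []) ++
        (if roles.any (fun r => r == "pm" || r == "finance" || r == "executive")
          then ["施工"] else []) ++
        (if (roles.any (fun r =>
              !(r == "owner" || r == "pm" || r == "finance" || r == "executive"))
            || (roles.contains "owner" &&
                roles.any (fun r => r == "pm" || r == "finance" || r == "executive")))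
          then ["通用"] else []) : List String).Pairwise
          (fun x y => (fun z => z) x < (fun z => z) y) :=
      pv_L_pairwise _ _ _ hltYS hltST hltYT _ _ _
    refine PySem.List.sorted_eq_of_perm_of_pairwise_lt _ _ _ ?_ hpair
    have hnodupL : _root_.List.Nodup _ := hpair.imp (fun h => ne_of_lt h)
    rw [List.perm_ext_iff_of_nodup hnodupL hnodup1]
    intro y
    rw [hmem1, pv_L_mem]
    have e1 : roles.contains "owner" = true ↔ "owner" ∈ roles := by
      simp
    have e2 : roles.any (fun r => r == "pm" || r == "finance" || r == "executive") = true
        ↔ ∃ r ∈ roles, r = "pm" ∨ r = "finance" ∨ r = "executive" := by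
      simp [List.any_eq, or_assoc]
    have e3 : roles.any (fun r =>
          !(r == "owner" || r == "pm" || r == "finance" || r == "executive")) = true
        ↔ ∃ r ∈ roles, r ≠ "owner" ∧ r ≠ "pm" ∧ r ≠ "finance" ∧ r ≠ "executive" := by
      simp [List.any_eq, and_assoc]
    simp only [Bool.or_eq_true, Bool.and_eq_true, e1, e2, e3]

-- ===== VERDICT =====
-- (the verdict theorem role_scope_py_spec above proves Claim_equal_role_scope_py by name)
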